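-- pv_equiv track=rewrite | github.com/JoseJesusLaCasaNieto/Programming_Challenges | 2023/Octal_Y_Hexadecimal.py | dec_to_hex_oct
-- ===== SOURCE A (Python) =====
-- def dec_to_hex_oct(decimal):
--     decimal = int(decimal)
--     hex_dict = {0: '0', 1: '1', 2: '2', 3: '3', 4: '4', 5: '5', 6: '6', 7: '7', 8:'8', 9: '9', 10: 'A', 11: 'B', 12: 'C', 13: 'D', 14: 'E', 15: 'F'}
--     oct_dict = {0: '0', 1: '1', 2: '2', 3: '3', 4: '4', 5: '5', 6: '6', 7: '7'}
--
--     hexadecimal = []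
--     octal = []
--
--     # Conversión a hexadecimal.
--     decimal_hex = decimal
--     while decimal_hex > 0:
--         rest = decimal_hex % 16
--         hexadecimal.append(hex_dict[rest])
--         decimal_hex //= 16
--
--     hexadecimal = hexadecimal[::-1]
--
--     # Conversión a octal.
--     decimal_oct = decimal
--     while decimal_oct > 0:
--         rest = decimal_oct % 8
--         octal.append(oct_dict[rest])
--         decimal_oct //= 8
--
--     octal = octal[::-1]
--
--     return ''.join(hexadecimal), ''.join(octal)
-- ===== SOURCE B (Python) =====
-- HEXDIGITS = "0123456789ABCDEF"
-- OCTDIGITS = "01234567"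
--
--
-- def to_base(n, base, digits):
--     return '' if n <= 0 else to_base(n // base, base, digits) + digits[n % base]
--
--
-- def dec_to_hex_oct(decimal):
--     decimal = int(decimal)
--     return to_base(decimal, 16, HEXDIGITS), to_base(decimal, 8, OCTDIGITS)
-- ===== Notes on version B (the rewrite author's own statement) =====
-- stated objective: simpler
-- what changed: Replaces A's two while-loops that append digit strings to lists and then reverse/join them with a single recursive to_base helper that builds the digit string in the correct order directly, eliminating the digit dicts, the lists and the [::-1] reversals.
import Mathlib
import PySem

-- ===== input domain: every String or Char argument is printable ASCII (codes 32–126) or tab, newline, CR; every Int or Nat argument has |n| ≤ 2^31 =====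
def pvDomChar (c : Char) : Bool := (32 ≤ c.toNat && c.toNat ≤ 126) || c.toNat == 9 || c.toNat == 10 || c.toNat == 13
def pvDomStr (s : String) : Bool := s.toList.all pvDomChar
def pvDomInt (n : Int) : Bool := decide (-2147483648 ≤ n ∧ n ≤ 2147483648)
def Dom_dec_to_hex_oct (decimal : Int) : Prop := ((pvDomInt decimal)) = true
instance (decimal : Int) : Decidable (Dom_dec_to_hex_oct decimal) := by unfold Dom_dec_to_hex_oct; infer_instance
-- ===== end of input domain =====

-- B replaces A's two append-then-reverse-then-join digit loops by one recursive
-- to_base helper building each string in order (objective: simpler, same cost).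
-- Strings are represented as List Char and wrapped with String.ofList at the end.

-- ===== PORT A =====
def pvHexDict : PySem.Dict Int (List Char) :=
  PySem.Dict.ofList [(0, ['0']), (1, ['1']), (2, ['2']), (3, ['3']), (4, ['4']),
    (5, ['5']), (6, ['6']), (7, ['7']), (8, ['8']), (9, ['9']), (10, ['A']),
    (11, ['B']), (12, ['C']), (13, ['D']), (14, ['E']), (15, ['F'])]

def pvOctDict : PySem.Dict Int (List Char) :=
  PySem.Dict.ofList [(0, ['0']), (1, ['1']), (2, ['2']), (3, ['3']), (4, ['4']),
    (5, ['5']), (6, ['6']), (7, ['7'])]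

-- A's first while loop ('while decimal_hex > 0'); the dict key rest = n % 16 is
-- always present, so get?.getD [] is exact (no KeyError is reachable).
def pvHexLoop (n : Int) (acc : List (List Char)) : List (List Char) :=
  if h : 0 < n then
    pvHexLoop (PySem.Int.floordiv n 16)
      (acc ++ [(pvHexDict.get? (PySem.Int.mod n 16)).getD []])
  else acc
termination_by n.toNat
decreasing_by
  rw [PySem.Int.floordiv_eq_ediv_of_pos (by norm_num)]
  omega

-- A's second while loop ('while decimal_oct > 0').
def pvOctLoop (n : Int) (acc : List (List Char)) : List (List Char) :=
  if h : 0 < n then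
    pvOctLoop (PySem.Int.floordiv n 8)
      (acc ++ [(pvOctDict.get? (PySem.Int.mod n 8)).getD []])
  else acc
termination_by n.toNat
decreasing_by
  rw [PySem.Int.floordiv_eq_ediv_of_pos (by norm_num)]
  omega

def dec_to_hex_oct (decimal : Int) : String × String :=
  let hexadecimal := pvHexLoop decimal []
  let hexadecimal := (PySem.List.slice? hexadecimal none none (-1)).getD []  -- [::-1]
  let octal := pvOctLoop decimal []
  let octal := (PySem.List.slice? octal none none (-1)).getD []              -- [::-1]
  (String.ofList (PySem.Chars.join [] hexadecimal),
   String.ofList (PySem.Chars.join [] octal))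

-- ===== PORT B =====
def pvHEXDIGITS : List Char := "0123456789ABCDEF".toList
def pvOCTDIGITS : List Char := "01234567".toList

-- Source B's to_base; the 'base ≤ 1' branch is only a totality guard (Python's
-- to_base would not terminate there; it is never reached for bases 16 and 8).
def pvToBase (n base : Int) (digits : List Char) : List Char :=
  if h : n ≤ 0 then []
  else if hb : base ≤ 1 then []
  else
    pvToBase (PySem.Int.floordiv n base) base digits ++
      ((PySem.List.pyGet? digits (PySem.Int.mod n base)).map (fun c => [c])).getD []
termination_by n.toNat
decreasing_by
  rw [PySem.Int.floordiv_eq_ediv_of_pos (by omega)]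
  have h1 : n / base < n := by rw [Int.ediv_lt_iff_lt_mul (by omega)]; nlinarith
  have h2 : 0 ≤ n / base := Int.ediv_nonneg (by omega) (by omega)
  omega

def dec_to_hex_oct_alt (decimal : Int) : String × String :=
  (String.ofList (pvToBase decimal 16 pvHEXDIGITS),
   String.ofList (pvToBase decimal 8 pvOCTDIGITS))

-- ===== PRECONDITION & SPEC =====
def Spec_dec_to_hex_oct (decimal : Int) (out : String × String) : Prop := out = dec_to_hex_oct_alt decimal
instance (decimal : Int) (out : String × String) : Decidable (Spec_dec_to_hex_oct decimal out) := by unfold Spec_dec_to_hex_oct; infer_instance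

-- ===== CLAIM (what is proved, stated in full; the proofs are below) =====
def Claim_equal_dec_to_hex_oct : Prop := ∀ (decimal : Int), Dom_dec_to_hex_oct decimal → Spec_dec_to_hex_oct decimal (dec_to_hex_oct decimal)

-- ===== LEMMAS AND PROOFS =====

theorem pv_join_nil_eq_flatten (xs : List (List Char)) :
    PySem.Chars.join [] xs = xs.flatten := by
  induction xs with
  | nil => rfl
  | cons a t ih =>
    cases t with
    | nil => rw [PySem.Chars.join_singleton]; simp
    | cons b t' =>
      rw [PySem.Chars.join_cons_cons]
      simp only [List.flatten_cons] at ih ⊢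
      rw [ih]; simp

theorem pvHexDigit_eq (r : Int) (h0 : 0 ≤ r) (h1 : r < 16) :
    (pvHexDict.get? r).getD [] =
      ((PySem.List.pyGet? pvHEXDIGITS r).map (fun c => [c])).getD [] := by
  interval_cases r <;> decide

theorem pvOctDigit_eq (r : Int) (h0 : 0 ≤ r) (h1 : r < 8) :
    (pvOctDict.get? r).getD [] =
      ((PySem.List.pyGet? pvOCTDIGITS r).map (fun c => [c])).getD [] := by
  interval_cases r <;> decide

theorem pvHex_eq (n : Int) (acc : List (List Char)) :
    (pvHexLoop n acc).reverse.flatten = pvToBase n 16 pvHEXDIGITS ++ acc.reverse.flatten := by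
  induction n, acc using pvHexLoop.induct with
  | case1 n acc h ih =>
    rw [pvToBase, dif_neg (by omega), dif_neg (by norm_num), pvHexLoop, dif_pos h, ih,
      pvHexDigit_eq (PySem.Int.mod n 16) (by exact PySem.Int.mod_nonneg n (by norm_num))
        (by exact PySem.Int.mod_lt n (by norm_num))]
    simp
  | case2 n acc h =>
    rw [pvHexLoop, dif_neg h, pvToBase, dif_pos (by omega)]
    simp

theorem pvOct_eq (n : Int) (acc : List (List Char)) :
    (pvOctLoop n acc).reverse.flatten = pvToBase n 8 pvOCTDIGITS ++ acc.reverse.flatten := by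
  induction n, acc using pvOctLoop.induct with
  | case1 n acc h ih =>
    rw [pvToBase, dif_neg (by omega), dif_neg (by norm_num), pvOctLoop, dif_pos h, ih,
      pvOctDigit_eq (PySem.Int.mod n 8) (by exact PySem.Int.mod_nonneg n (by norm_num))
        (by exact PySem.Int.mod_lt n (by norm_num))]
    simp
  | case2 n acc h =>
    rw [pvOctLoop, dif_neg h, pvToBase, dif_pos (by omega)]
    simp

-- ===== VERDICT (by name: the statement is the Claim_ definition above) =====
theorem dec_to_hex_oct_spec : Claim_equal_dec_to_hex_oct := by
  intro n _
  unfold Spec_dec_to_hex_oct dec_to_hex_oct dec_to_hex_oct_alt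
  simp only [PySem.List.slice?_none_none_neg_one, Option.getD_some,
    pv_join_nil_eq_flatten, pvHex_eq, pvOct_eq, List.reverse_nil, List.flatten_nil,
    List.append_nil]
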